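-- pv_equiv track=rewrite | github.com/kulakaka/NUSCS | CS1010E/PETEST.py | card_game_s
-- ===== SOURCE A (Python) =====
-- def card_game_s(N,start_pos,start_dir,seq):
--
--     np= N-start_pos-1
--     if start_dir == 'CCW':
--         for i in seq:
--             if i=='D':
--                 np-=1
--             elif i == 'R':
--                 np+=1
--             elif i == 'S':
--                 np-=2
--             if np == 0:
--                 np==N
--             elif np == -2:
--                 np==N-2
--             elif np == -1:
--                 np==N-1
--     elif start_dir =='CW':
--         for i in seq:
--             if i=='D':
--                 np+=1
--             elif i == 'R':
--                 np-=1
--             elif i == 'S':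
--                 np+=2
--             if np==N:
--                 np=0
--             elif np==N+2:
--                 np==2
--             elif np == N+1:
--                 np==1
--     return np
-- ===== SOURCE B (Python) =====
-- def card_game_s(N, start_pos, start_dir, seq):
--     np = N - start_pos - 1
--     if start_dir == 'CCW':
--         # closed form: the wrap checks in the CCW branch of the original are no-ops
--         return np + seq.count('R') - seq.count('D') - 2 * seq.count('S')
--     if start_dir == 'CW':
--         delta = {'D': 1, 'R': -1, 'S': 2}
--         for c in seq:
--             np += delta.get(c, 0)
--             if np == N:
--                 np = 0
--     return np
-- ===== Notes on version B (the rewrite author's own statement) =====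
-- stated objective: alternative
-- what changed: The CCW branch is replaced by a closed-form counting expression (np + count('R') - count('D') - 2*count('S')), valid because A's CCW wrap lines are comparison no-ops; the CW branch is rewritten as a table-driven delta loop keeping only A's one genuine reset np==N -> 0.
import Mathlib
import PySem

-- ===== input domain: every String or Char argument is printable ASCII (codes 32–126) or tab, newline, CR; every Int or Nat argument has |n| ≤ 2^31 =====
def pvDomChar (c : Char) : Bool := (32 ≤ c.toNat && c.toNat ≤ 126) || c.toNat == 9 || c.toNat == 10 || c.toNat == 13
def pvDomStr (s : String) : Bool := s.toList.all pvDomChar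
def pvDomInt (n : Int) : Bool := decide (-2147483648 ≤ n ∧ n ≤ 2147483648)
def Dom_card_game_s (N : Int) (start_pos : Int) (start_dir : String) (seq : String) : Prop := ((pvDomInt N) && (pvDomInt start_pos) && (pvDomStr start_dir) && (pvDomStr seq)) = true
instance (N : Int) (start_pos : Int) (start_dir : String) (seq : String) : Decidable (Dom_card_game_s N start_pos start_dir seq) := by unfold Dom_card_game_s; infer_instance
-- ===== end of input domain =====

-- B replaces A's stepwise CCW simulation by a closed-form counting expression (the CCW
-- wrap lines in A are comparison no-ops) and drives the CW loop by a delta table with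
-- A's single genuine reset; objective: alternative decomposition, same O(|seq|) cost.

-- ===== PORT A =====
-- one CCW loop iteration of A; the trailing `if np == 0: np==N / elif …` chain only
-- EVALUATES comparisons (`np==N` is an expression statement, not an assignment), so it
-- changes nothing and is ported as the identity it is
def cgsAStepCCW (np : Int) (i : Char) : Int :=
  if i = 'D' then np - 1
  else if i = 'R' then np + 1
  else if i = 'S' then np - 2
  else np

-- one CW loop iteration of A; only `if np==N: np=0` assigns (the elif arms are again
-- bare comparison expressions, ported as no-ops)
def cgsAStepCW (N : Int) (np : Int) (i : Char) : Int :=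
  let np :=
    if i = 'D' then np + 1
    else if i = 'R' then np - 1
    else if i = 'S' then np + 2
    else np
  if np = N then 0 else np

def card_game_s (N : Int) (start_pos : Int) (start_dir : String) (seq : String) : Int :=
  let np := N - start_pos - 1
  if start_dir = "CCW" then seq.toList.foldl cgsAStepCCW np
  else if start_dir = "CW" then seq.toList.foldl (cgsAStepCW N) np
  else np

-- ===== PORT B =====
-- delta.get(c, 0) of Source B's {'D': 1, 'R': -1, 'S': 2}
def cgsDelta : PySem.Dict Char Int :=
  (PySem.Dict.empty.insert 'D' 1).insert 'R' (-1) |>.insert 'S' 2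

def card_game_s_alt (N : Int) (start_pos : Int) (start_dir : String) (seq : String) : Int :=
  let np := N - start_pos - 1
  if start_dir = "CCW" then
    np + (PySem.Str.count seq "R" : Int) - (PySem.Str.count seq "D" : Int)
       - 2 * (PySem.Str.count seq "S" : Int)
  else if start_dir = "CW" then
    seq.toList.foldl (fun np c =>
      let np := np + cgsDelta.getD c 0
      if np = N then 0 else np) np
  else np

-- ===== PRECONDITION & SPEC =====
def Spec_card_game_s (N : Int) (start_pos : Int) (start_dir : String) (seq : String) (out : Int) : Prop := out = card_game_s_alt N start_pos start_dir seq
instance (N : Int) (start_pos : Int) (start_dir : String) (seq : String) (out : Int) : Decidable (Spec_card_game_s N start_pos start_dir seq out) := by unfold Spec_card_game_s; infer_instance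

-- ===== CLAIM (what is proved, stated in full; the proofs are below) =====
def Claim_equal_card_game_s : Prop := ∀ (N : Int) (start_pos : Int) (start_dir : String) (seq : String), Dom_card_game_s N start_pos start_dir seq → Spec_card_game_s N start_pos start_dir seq (card_game_s N start_pos start_dir seq)

-- ===== LEMMAS AND PROOFS =====

-- PySem.Chars.count with a one-character needle is List.count (fuel-generalised helper)
theorem cgs_go_singleton (c : Char) (l : List Char) (acc : Nat) (fuel : Nat) (h : l.length ≤ fuel) :
    PySem.Chars.count.go [c] fuel l acc = acc + l.count c := by
  induction l generalizing fuel acc with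
  | nil => cases fuel <;> simp [PySem.Chars.count.go]
  | cons x t ih =>
      cases fuel with
      | zero => simp at h
      | succ f =>
        rw [show PySem.Chars.count.go [c] (f+1) (x :: t) acc =
          (if [c].isPrefixOf (x :: t) then PySem.Chars.count.go [c] f (List.drop 1 (x :: t)) (acc + 1)
           else PySem.Chars.count.go [c] f t acc) from rfl]
        simp only [List.length_cons] at h
        have hf : t.length ≤ f := by omega
        by_cases hx : x = c
        · simp [List.isPrefixOf, hx, ih (acc + 1) f hf]
          omega
        · simp [List.isPrefixOf, hx, ih acc f hf, Ne.symm hx]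

theorem cgs_count_singleton (c : Char) (l : List Char) :
    PySem.Chars.count l [c] = l.count c := by
  simp [PySem.Chars.count, cgs_go_singleton c l 0 l.length le_rfl]

-- A's CCW fold is the closed-form count expression
theorem cgs_ccw_closed (l : List Char) (np : Int) :
    l.foldl cgsAStepCCW np
      = np + (l.count 'R' : Int) - (l.count 'D' : Int) - 2 * (l.count 'S' : Int) := by
  induction l generalizing np with
  | nil => simp
  | cons x t ih =>
      simp only [List.foldl_cons, ih, List.count_cons, cgsAStepCCW]
      by_cases hd : x = 'D' <;> by_cases hr : x = 'R' <;> by_cases hs : x = 'S' <;>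
        simp_all <;> ring

-- A's CW step and B's CW step agree pointwise
theorem cgs_cw_step_eq (N np : Int) (c : Char) :
    cgsAStepCW N np c = (let np := np + cgsDelta.getD c 0; if np = N then 0 else np) := by
  by_cases hd : c = 'D'
  · subst hd; simp [cgsAStepCW, cgsDelta, PySem.Dict.getD, PySem.Dict.get?, PySem.Dict.insert,
      PySem.Dict.empty]
  · by_cases hr : c = 'R'
    · subst hr; simp [cgsAStepCW, cgsDelta, PySem.Dict.getD, PySem.Dict.get?, PySem.Dict.insert,
        PySem.Dict.empty, List.find?]
      split_ifs <;> omega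
    · by_cases hs : c = 'S'
      · subst hs; simp [cgsAStepCW, cgsDelta, PySem.Dict.getD, PySem.Dict.get?, PySem.Dict.insert,
          PySem.Dict.empty, List.find?]
      · have h1 : ('D' == c) = false := by simp [Ne.symm hd]
        have h2 : ('R' == c) = false := by simp [Ne.symm hr]
        have h3 : ('S' == c) = false := by simp [Ne.symm hs]
        simp [cgsAStepCW, cgsDelta, PySem.Dict.getD, PySem.Dict.get?, PySem.Dict.insert,
          PySem.Dict.empty, List.find?, h1, h2, h3, hd, hr, hs]

-- hence the two CW folds agree
theorem cgs_cw_fold (N : Int) (l : List Char) (np : Int) :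
    l.foldl (cgsAStepCW N) np
      = l.foldl (fun np c => let np := np + cgsDelta.getD c 0; if np = N then 0 else np) np := by
  induction l generalizing np with
  | nil => rfl
  | cons x t ih => simp only [List.foldl_cons, ih, cgs_cw_step_eq]

-- ===== VERDICT (by name: the statement is the Claim_ definition above) =====
theorem card_game_s_spec : Claim_equal_card_game_s := by
  intro N start_pos start_dir seq _
  unfold Spec_card_game_s
  by_cases h1 : start_dir = "CCW"
  · subst h1
    simp [card_game_s, card_game_s_alt, cgs_ccw_closed, PySem.Str.count, cgs_count_singleton]
  · by_cases h2 : start_dir = "CW"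
    · subst h2
      simp [card_game_s, card_game_s_alt, cgs_cw_fold]
    · simp [card_game_s, card_game_s_alt, h1, h2]
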